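-- pv_equiv track=rewrite | github.com/mwayne54/stanza | stanza/utils/datasets/tokenization/convert_th_lst20.py | read_document
-- ===== SOURCE A (Python) =====
-- def read_document(lines):
--     document = []
--     sentence = []
--     for line in lines:
--         line = line.strip()
--         if not line:
--             if sentence:
--                 #sentence[-1] = (sentence[-1][0], True)
--                 document.append(sentence)
--                 sentence = []
--         else:
--             pieces = line.split("\t")
--             # there are some nbsp in tokens in lst20, but the downstream tools expect spaces
--             pieces = [p.replace("\xa0", " ") for p in pieces]
--             if pieces[0] == '_':
--                 sentence[-1] = (sentence[-1][0], True)
--             else: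
--                 sentence.append((pieces[0], False))
--
--     if sentence:
--         #sentence[-1] = (sentence[-1][0], True)
--         document.append(sentence)
--         sentence = []
--     # TODO: is there any way to divide up a single document into paragraphs?
--     return [[document]]
-- ===== SOURCE B (Python) =====
-- def read_document(lines):
--     # Pass 1: split the stripped lines into maximal blocks of non-blank lines.
--     blocks = []
--     cur = []
--     for line in lines:
--         s = line.strip()
--         if s:
--             cur.append(s)
--         elif cur:
--             blocks.append(cur)
--             cur = []
--     if cur:
--         blocks.append(cur)
--
--     # Pass 2: each block becomes a sentence; a token's flag is True exactly
--     # when the line right after it in the block is a '_' marker line.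
--     def first_field(s):
--         return s.split("\t")[0].replace("\xa0", " ")
--
--     def sentence_of(block):
--         flags = [first_field(b) == "_" for b in block[1:]] + [False]
--         return [(first_field(l), f)
--                 for l, f in zip(block, flags)
--                 if first_field(l) != "_"]
--
--     document = [s for s in map(sentence_of, blocks) if s]
--     return [[document]]
-- ===== Notes on version B (the rewrite author's own statement) =====
-- stated objective: alternative
-- what changed: A builds the document in one stateful pass that mutates the last-appended tuple when a '_' line arrives; B first splits the stripped lines into blocks at blank lines, then builds each sentence purely by zipping every line with a one-line lookahead flag ('next line is a _ marker'), with no mutation of already-emitted tokens.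
import Mathlib
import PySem

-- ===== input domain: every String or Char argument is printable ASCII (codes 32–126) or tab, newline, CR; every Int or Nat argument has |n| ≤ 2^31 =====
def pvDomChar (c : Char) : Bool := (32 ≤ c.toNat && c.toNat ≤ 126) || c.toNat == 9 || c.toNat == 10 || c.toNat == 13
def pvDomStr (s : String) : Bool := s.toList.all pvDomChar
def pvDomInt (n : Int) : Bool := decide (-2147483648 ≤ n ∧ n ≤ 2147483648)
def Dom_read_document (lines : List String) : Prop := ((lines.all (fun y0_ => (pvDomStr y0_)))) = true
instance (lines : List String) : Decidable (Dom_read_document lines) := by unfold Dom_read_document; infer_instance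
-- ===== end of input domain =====

-- B replaces A's single stateful pass (which mutates the last-appended tuple on a '_' line)
-- by a split-into-blocks pass plus a pure per-block lookahead construction; same cost.
-- A raises IndexError when a block of non-blank lines begins with '_'; those inputs are outside Pre_.

-- ===== PORT A =====
-- pieces[0]: str.split always returns a nonempty list, so [0] is its head (headD is exact here)
def pvStepA (st : List (List (String × Bool)) × List (String × Bool)) (line : String) :
    List (List (String × Bool)) × List (String × Bool) :=
  let s := PySem.Str.strip line
  if s = "" then
    if st.2 = [] then st else (st.1 ++ [st.2], [])
  else
    -- str.split("\t"): sep ≠ "" so split? is always `some`; split always returns a nonempty list, so [0] is headD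
    let pieces := ((PySem.Str.split? s "\t").getD []).map (fun p => PySem.Str.replace p "\u00A0" " ")
    if pieces.headD "" = "_" then
      match st.2.getLast? with
      | some last => (st.1, st.2.dropLast ++ [(last.1, true)])
      | none => st      -- Python raises IndexError here (sentence[-1] on []); excluded by Pre_
    else
      (st.1, st.2 ++ [(pieces.headD "", false)])

def read_document (lines : List String) : List (List (List (List (String × Bool)))) :=
  let st := lines.foldl pvStepA ([], [])
  [[if st.2 = [] then st.1 else st.1 ++ [st.2]]]

-- ===== PORT B =====
-- s.split("\t")[0].replace("\xa0", " "): sep ≠ "" so split? is always `some`, and split is never empty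
def pvFirstField (s : String) : String :=
  PySem.Str.replace (((PySem.Str.split? s "\t").getD []).headD "") "\u00A0" " "

def pvStepB (st : List (List String) × List String) (line : String) :
    List (List String) × List String :=
  let s := PySem.Str.strip line
  if s ≠ "" then (st.1, st.2 ++ [s])
  else if st.2 = [] then st else (st.1 ++ [st.2], [])

def pvSentenceOf (block : List String) : List (String × Bool) :=
  let flags := (block.drop 1).map (fun b => decide (pvFirstField b = "_")) ++ [false]
  (block.zip flags).filterMap (fun lf =>
    if pvFirstField lf.1 = "_" then none else some (pvFirstField lf.1, lf.2))

def read_document_alt (lines : List String) : List (List (List (List (String × Bool)))) :=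
  let st := lines.foldl pvStepB ([], [])
  let blocks := if st.2 = [] then st.1 else st.1 ++ [st.2]
  [[(blocks.map pvSentenceOf).filter (fun s => !s.isEmpty)]]

-- ===== PRECONDITION & SPEC =====
-- Pre_ excludes exactly the inputs on which the Python A raises IndexError: some maximal run of
-- non-blank lines begins with a '_' marker line, so `sentence[-1]` is evaluated on an empty sentence.
-- The Bool recursion below just tracks "is the current block still without a token" over the lines.
def pvNoLeadUnderscore : Bool → List String → Bool
  | _, [] => true
  | empty, l :: ls =>
    let s := PySem.Str.strip l
    if s = "" then pvNoLeadUnderscore true ls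
    else if pvFirstField s = "_" then !empty && pvNoLeadUnderscore false ls
    else pvNoLeadUnderscore false ls

def Pre_read_document (lines : List String) : Prop := pvNoLeadUnderscore true lines = true
instance (lines : List String) : Decidable (Pre_read_document lines) := by
  unfold Pre_read_document; infer_instance

def pvWitness_read_document : List String := ["hello\tNN", "_", "", "world\tVB", "again"]

def Spec_read_document (lines : List String) (out : List (List (List (List (String × Bool))))) : Prop := out = read_document_alt lines
instance (lines : List String) (out : List (List (List (List (String × Bool))))) : Decidable (Spec_read_document lines out) := by unfold Spec_read_document; infer_instance

-- ===== CLAIM (what is proved, stated in full; the proofs are below) =====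
def Claim_equal_read_document : Prop := ∀ (lines : List String), Dom_read_document lines → Pre_read_document lines → Spec_read_document lines (read_document lines)

-- ===== LEMMAS AND PROOFS =====

-- recursive characterisation of pvSentenceOf used by the proofs
def pvAux : List String → List (String × Bool)
  | [] => []
  | [l] => if pvFirstField l = "_" then [] else [(pvFirstField l, false)]
  | l :: l' :: rest =>
    (if pvFirstField l = "_" then [] else [(pvFirstField l, decide (pvFirstField l' = "_"))]) ++ pvAux (l' :: rest)

-- "sentence[-1] = (sentence[-1][0], True)" as a pure function
def pvSetLast : List (String × Bool) → List (String × Bool)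
  | [] => []
  | [x] => [(x.1, true)]
  | x :: xs => x :: pvSetLast xs

lemma pvSentenceOf_eq_aux (b : List String) : pvSentenceOf b = pvAux b := by
  induction b with
  | nil => rfl
  | cons l rest ih =>
    cases rest with
    | nil => by_cases h : pvFirstField l = "_" <;> simp [pvSentenceOf, pvAux, h]
    | cons l' t =>
      have ih' : pvSentenceOf (l' :: t) = pvAux (l' :: t) := ih
      simp only [pvSentenceOf, pvAux] at *
      simp only [List.drop_succ_cons, List.drop_zero, List.map_cons, List.cons_append,
        List.zip_cons_cons, List.filterMap_cons] at *
      by_cases h : pvFirstField l = "_" <;> simp [h, ih']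

lemma pvSetLast_cons (x : String × Bool) (xs : List (String × Bool)) :
    pvSetLast (x :: xs) = if xs = [] then [(x.1, true)] else x :: pvSetLast xs := by
  cases xs <;> rfl

lemma pvAux_nil_all_underscore (l : String) (t : List String)
    (h : pvAux (l :: t) = []) : pvFirstField l = "_" := by
  cases t with
  | nil => by_cases hl : pvFirstField l = "_" <;> simp [pvAux, hl] at h ⊢
  | cons l' t' => by_cases hl : pvFirstField l = "_" <;> simp [pvAux, hl] at h ⊢

-- L1: appending a token line appends one token with flag false
lemma pvAux_append_token (cur : List String) (s : String) (hs : pvFirstField s ≠ "_") :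
    pvAux (cur ++ [s]) = pvAux cur ++ [(pvFirstField s, false)] := by
  induction cur with
  | nil => simp [pvAux, hs]
  | cons c rest ih =>
    cases rest with
    | nil =>
      by_cases hc : pvFirstField c = "_" <;>
        simp [pvAux, hc, hs]
    | cons c' t =>
      simp only [List.cons_append] at ih ⊢
      by_cases hc : pvFirstField c = "_" <;>
        simp [pvAux, hc, ih]

-- L2: appending a '_' marker line sets the last token's flag to true
lemma pvAux_append_underscore (cur : List String) (s : String) (hs : pvFirstField s = "_") :
    pvAux (cur ++ [s]) = pvSetLast (pvAux cur) := by
  induction cur with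
  | nil => simp [pvAux, hs, pvSetLast]
  | cons c rest ih =>
    cases rest with
    | nil =>
      by_cases hc : pvFirstField c = "_" <;>
        simp [pvAux, hc, hs, pvSetLast]
    | cons c' t =>
      by_cases hc : pvFirstField c = "_"
      · simp only [List.cons_append] at ih ⊢
        simpa [pvAux, hc] using ih
      · simp only [List.cons_append] at ih ⊢
        simp only [pvAux, hc, ite_false]
        rw [ih]
        rcases hx : pvAux (c' :: t) with _ | ⟨x, xs⟩
        · have hc' : pvFirstField c' = "_" := pvAux_nil_all_underscore c' t hx
          simp [pvSetLast, hc']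
        · simp [pvSetLast_cons]

lemma pvAux_ne_nil_of_head_token (c : String) (t : List String) (hc : pvFirstField c ≠ "_") :
    pvAux (c :: t) ≠ [] := by
  cases t <;> simp [pvAux, hc]

lemma pvDropLast_getLast_eq_setLast (l : List (String × Bool)) (h : l ≠ []) (last : String × Bool)
    (hl : l.getLast? = some last) : l.dropLast ++ [(last.1, true)] = pvSetLast l := by
  induction l with
  | nil => simp at h
  | cons x xs ih =>
    cases xs with
    | nil =>
      simp [List.getLast?] at hl
      simp [pvSetLast, hl]
    | cons y ys =>
      have hxs : (y :: ys) ≠ [] := by simp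
      have hl' : (y :: ys).getLast? = some last := by
        simpa [List.getLast?_cons_cons] using hl
      simp only [pvSetLast_cons, if_neg (by simp : ¬(y :: ys = []))]
      rw [List.dropLast_cons_of_ne_nil hxs, List.cons_append, ih hxs hl']
      exact congrArg _ (pvSetLast_cons y ys)

def pvHeadTok (cur : List String) : Prop := ∀ h : cur ≠ [], pvFirstField (cur.head h) ≠ "_"

def pvDocOf (blocks : List (List String)) : List (List (String × Bool)) :=
  (blocks.map pvSentenceOf).filter (fun s => !s.isEmpty)

lemma pvDocOf_append (blocks : List (List String)) (cur : List String)
    (h : pvSentenceOf cur ≠ []) :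
    pvDocOf (blocks ++ [cur]) = pvDocOf blocks ++ [pvSentenceOf cur] := by
  simp [pvDocOf, List.filter_append, h]

lemma pvSent_ne_nil (cur : List String) (hne : cur ≠ []) (ht : pvHeadTok cur) :
    pvSentenceOf cur ≠ [] := by
  rcases cur with _ | ⟨c, t⟩
  · exact absurd rfl hne
  · rw [pvSentenceOf_eq_aux]
    exact pvAux_ne_nil_of_head_token c t (ht (by simp))

lemma pvSentenceOf_nil : pvSentenceOf [] = [] := rfl

lemma pvHeadD_map_replace (l : List String) :
    (l.map (fun p => PySem.Str.replace p "\u00A0" " ")).headD ""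
      = PySem.Str.replace (l.headD "") "\u00A0" " " := by
  cases l with
  | nil => decide
  | cons a t => rfl

-- pieces[0] in A is exactly pvFirstField of the stripped line
lemma pvPieces_head (s : String) :
    (((PySem.Str.split? s "\t").getD []).map (fun p => PySem.Str.replace p "\u00A0" " ")).headD ""
      = pvFirstField s := pvHeadD_map_replace _

-- main simulation: A's fold state is the image of B's fold state
lemma pvMain (ls : List String) : ∀ (blocks : List (List String)) (cur : List String),
    pvHeadTok cur →
    pvNoLeadUnderscore cur.isEmpty ls = true →
    ls.foldl pvStepA (pvDocOf blocks, pvSentenceOf cur)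
      = (pvDocOf (ls.foldl pvStepB (blocks, cur)).1,
         pvSentenceOf (ls.foldl pvStepB (blocks, cur)).2)
      ∧ pvHeadTok (ls.foldl pvStepB (blocks, cur)).2 := by
  induction ls with
  | nil => exact fun blocks cur ht _ => ⟨rfl, ht⟩
  | cons l rest ih =>
    intro blocks cur ht hpre
    rw [pvNoLeadUnderscore] at hpre
    simp only [List.foldl_cons]
    by_cases hblank : PySem.Str.strip l = ""
    · -- blank line
      simp only [hblank] at hpre
      rcases hcur : cur with _ | ⟨c, t⟩
      · subst hcur
        have hA : pvStepA (pvDocOf blocks, pvSentenceOf []) l = (pvDocOf blocks, pvSentenceOf []) := by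
          simp [pvStepA, hblank, pvSentenceOf_nil]
        have hB : pvStepB (blocks, ([] : List String)) l = (blocks, []) := by
          simp [pvStepB, hblank]
        rw [hA, hB]
        exact ih blocks [] (fun h => absurd rfl h) (by simpa using hpre)
      · subst hcur
        have hsent : pvSentenceOf (c :: t) ≠ [] := pvSent_ne_nil _ (by simp) ht
        have hA : pvStepA (pvDocOf blocks, pvSentenceOf (c :: t)) l
            = (pvDocOf blocks ++ [pvSentenceOf (c :: t)], pvSentenceOf []) := by
          simp [pvStepA, hblank, hsent, pvSentenceOf_nil]
        have hB : pvStepB (blocks, c :: t) l = (blocks ++ [c :: t], []) := by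
          simp [pvStepB, hblank]
        rw [hA, hB, ← pvDocOf_append blocks (c :: t) hsent]
        exact ih (blocks ++ [c :: t]) [] (fun h => absurd rfl h) (by simpa using hpre)
    · simp only [hblank] at hpre
      have hB : pvStepB (blocks, cur) l = (blocks, cur ++ [PySem.Str.strip l]) := by
        simp [pvStepB, hblank]
      by_cases hund : pvFirstField (PySem.Str.strip l) = "_"
      · -- '_' marker line: Pre_ forces the current block to be nonempty
        simp only [hund, if_true, if_false, Bool.and_eq_true, Bool.not_eq_true'] at hpre
        have hcurne : cur ≠ [] := by
          intro h; rw [h] at hpre; simp at hpre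
        have hsent : pvSentenceOf cur ≠ [] := pvSent_ne_nil cur hcurne ht
        obtain ⟨last, hlast⟩ : ∃ last, (pvSentenceOf cur).getLast? = some last := by
          rcases h : (pvSentenceOf cur).getLast? with _ | last
          · exact absurd (List.getLast?_eq_none_iff.mp h) hsent
          · exact ⟨last, rfl⟩
        have hA : pvStepA (pvDocOf blocks, pvSentenceOf cur) l
            = (pvDocOf blocks, pvSetLast (pvSentenceOf cur)) := by
          simp only [pvStepA, pvPieces_head, hblank, hund, if_true, if_false, hlast]
          rw [pvDropLast_getLast_eq_setLast (pvSentenceOf cur) hsent last hlast]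
        have hsent' : pvSentenceOf (cur ++ [PySem.Str.strip l]) = pvSetLast (pvSentenceOf cur) := by
          rw [pvSentenceOf_eq_aux, pvSentenceOf_eq_aux, pvAux_append_underscore cur _ hund]
        have ht' : pvHeadTok (cur ++ [PySem.Str.strip l]) := by
          intro h
          rcases cur with _ | ⟨c, t⟩
          · exact absurd rfl hcurne
          · simpa using ht (by simp)
        rw [hA, hB, ← hsent']
        have hemp : (cur ++ [PySem.Str.strip l]).isEmpty = false := by simp
        exact ih blocks (cur ++ [PySem.Str.strip l]) ht' (by rw [hemp]; exact hpre.2)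
      · -- token line
        simp only [hund, if_false] at hpre
        have hA : pvStepA (pvDocOf blocks, pvSentenceOf cur) l
            = (pvDocOf blocks, pvSentenceOf cur ++ [(pvFirstField (PySem.Str.strip l), false)]) := by
          simp only [pvStepA, pvPieces_head, hblank, hund, if_false]
        have hsent' : pvSentenceOf (cur ++ [PySem.Str.strip l])
            = pvSentenceOf cur ++ [(pvFirstField (PySem.Str.strip l), false)] := by
          rw [pvSentenceOf_eq_aux, pvSentenceOf_eq_aux, pvAux_append_token cur _ hund]
        have ht' : pvHeadTok (cur ++ [PySem.Str.strip l]) := by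
          intro h
          rcases cur with _ | ⟨c, t⟩
          · simpa using hund
          · simpa using ht (by simp)
        rw [hA, hB, ← hsent']
        have hemp : (cur ++ [PySem.Str.strip l]).isEmpty = false := by simp
        exact ih blocks (cur ++ [PySem.Str.strip l]) ht' (by rw [hemp]; exact hpre)

-- ===== VERDICT (by name: the statement is the Claim_ definition above) =====
theorem read_document_spec : Claim_equal_read_document := by
  intro lines _ hpre
  obtain ⟨heq, htok⟩ := pvMain lines [] [] (fun h => absurd rfl h) (by simpa using hpre)
  have heq' : List.foldl pvStepA ([], []) lines
      = (pvDocOf (List.foldl pvStepB ([], []) lines).1,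
         pvSentenceOf (List.foldl pvStepB ([], []) lines).2) := heq
  show read_document lines = read_document_alt lines
  by_cases h2 : (List.foldl pvStepB ([], []) lines).2 = []
  · simp [read_document, read_document_alt, heq', h2, pvSentenceOf_nil, pvDocOf]
  · have hsne : pvSentenceOf (List.foldl pvStepB ([], []) lines).2 ≠ [] :=
      pvSent_ne_nil _ h2 htok
    have hbe : (pvSentenceOf (List.foldl pvStepB ([], []) lines).2).isEmpty = false := by
      simp [hsne]
    simp [read_document, read_document_alt, heq', h2, hsne, pvDocOf, List.filter_append, hbe]
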